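-- pv_equiv track=rewrite | github.com/TsinghuaDatabaseGroup/OpenSQL | data_augment/vLLM_sample.py | get_result_key
-- ===== SOURCE A (Python) =====
-- from typing import Any
--
-- def get_result_key(result: Any) -> str | None:
--     """Compute a canonical string key for a SQL result set (order-insensitive)."""
--     if not isinstance(result, list):
--         return None
--     try:
--         processed_result = set(tuple(map(str, row)) for row in result)
--         return str(sorted(list(processed_result)))
--     except Exception:
--         return None
-- ===== SOURCE B (Python) =====
-- def get_result_key(result):
--     """Canonical order-insensitive key: maintain a sorted duplicate-free list by inserting each row at its position."""
--     if not isinstance(result, list):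
--         return None
--     try:
--         uniq = []
--         for row in result:
--             t = tuple(str(x) for x in row)
--             i = 0
--             while i < len(uniq) and uniq[i] < t:
--                 i += 1
--             if i == len(uniq) or uniq[i] != t:
--                 uniq.insert(i, t)
--         return str(uniq)
--     except Exception:
--         return None
-- ===== Notes on version B (the rewrite author's own statement) =====
-- stated objective: alternative
-- what changed: Replaces A's hash-set dedup followed by a library sort with a single pass that inserts each row into its position in an incrementally maintained sorted duplicate-free list (insertion sort with on-the-fly dedup).
import Mathlib
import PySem

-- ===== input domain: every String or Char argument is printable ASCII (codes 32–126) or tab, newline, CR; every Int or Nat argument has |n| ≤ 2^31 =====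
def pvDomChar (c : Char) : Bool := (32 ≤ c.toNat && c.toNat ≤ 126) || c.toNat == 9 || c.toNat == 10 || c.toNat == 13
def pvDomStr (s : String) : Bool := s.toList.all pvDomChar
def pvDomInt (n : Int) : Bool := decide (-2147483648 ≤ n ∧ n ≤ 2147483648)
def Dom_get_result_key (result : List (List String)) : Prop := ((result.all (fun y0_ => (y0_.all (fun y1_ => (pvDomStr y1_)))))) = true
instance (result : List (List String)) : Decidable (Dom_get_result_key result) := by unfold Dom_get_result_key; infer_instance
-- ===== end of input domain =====

-- ===== PORT A =====
-- B replaces A's set-dedup-then-sort with one-pass insertion into a sorted duplicate-free list (objective: alternative; not faster).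

-- Python repr of one character inside a string literal quoted by q (exact for printable ASCII, tab, newline, CR — the Dom_ alphabet)
def pyReprChar (q : Char) (c : Char) : List Char :=
  if c = '\\' then ['\\', '\\']
  else if c = q then ['\\', q]
  else if c = '\t' then ['\\', 't']
  else if c = '\n' then ['\\', 'n']
  else if c = '\r' then ['\\', 'r']
  else [c]

-- Python repr of a str: single quotes unless the string contains ' and no " (exact on the Dom_ alphabet)
def pyReprStrChars (s : String) : List Char :=
  let cs := s.toList
  let q : Char := if '\'' ∈ cs ∧ '"' ∉ cs then '"' else '\''
  q :: (cs.flatMap (pyReprChar q)) ++ [q]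

def pyJoinSep (sep : List Char) : List (List Char) → List Char
  | [] => []
  | [x] => x
  | x :: y :: xs => x ++ sep ++ pyJoinSep sep (y :: xs)

-- Python repr of a tuple of strs (trailing comma for a 1-tuple)
def pyReprRow (row : List String) : List Char :=
  match row with
  | [] => ['(', ')']
  | [s] => '(' :: (pyReprStrChars s ++ [',', ')'])
  | _ => '(' :: (pyJoinSep [',', ' '] (row.map pyReprStrChars) ++ [')'])

-- str(list_of_tuples)
def pyReprRowList (rows : List (List String)) : String :=
  String.ofList ('[' :: (pyJoinSep [',', ' '] (rows.map pyReprRow) ++ [']']))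

-- port of A: processed_result = set(tuple(map(str, row)) for row in result); str(sorted(list(processed_result)))
-- (isinstance(result, list) always holds at this type, and the try-body never raises on List (List String): A is total here)
def get_result_key (result : List (List String)) : Option String :=
  let processed := PySem.Set.ofList (result.map (fun row => row.map (fun s => s)))
  some (pyReprRowList (PySem.List.sorted processed (fun x => x) false))

-- ===== PORT B =====
-- the inner while/insert of Source B: walk past the elements < t, then insert t unless it is already there
def bInsert (t : List String) : List (List String) → List (List String)
  | [] => [t]
  | u :: us => if u < t then u :: bInsert t us else if u = t then u :: us else t :: u :: us

-- B's rendering of str(uniq), structured via intersperse/flatten and a foldr escape (exact on the Dom_ alphabet)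
def bEsc (q : Char) (c : Char) : List Char :=
  match c with
  | '\\' => ['\\', '\\']
  | '\t' => ['\\', 't']
  | '\n' => ['\\', 'n']
  | '\r' => ['\\', 'r']
  | c => if c = q then ['\\', q] else [c]

def bStr (s : String) : List Char :=
  let cs := s.toList
  let q : Char := if cs.contains '\'' && !(cs.contains '"') then '"' else '\''
  q :: cs.foldr (fun c acc => bEsc q c ++ acc) [q]

def bRow (row : List String) : List Char :=
  match row with
  | [t] => '(' :: (bStr t ++ [',', ')'])
  | _ => '(' :: (((row.map bStr).intersperse [',', ' ']).flatten ++ [')'])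

def bRender (rows : List (List String)) : String :=
  String.ofList ('[' :: (((rows.map bRow).intersperse [',', ' ']).flatten ++ [']']))

-- port of B: uniq starts empty; each row is inserted at its sorted position unless already present; str(uniq)
def get_result_key_alt (result : List (List String)) : Option String :=
  let uniq := result.foldl (fun acc row => bInsert (row.map (fun s => s)) acc) []
  some (bRender uniq)

-- ===== PRECONDITION & SPEC =====
def Spec_get_result_key (result : List (List String)) (out : Option String) : Prop := out = get_result_key_alt result
instance (result : List (List String)) (out : Option String) : Decidable (Spec_get_result_key result out) := by unfold Spec_get_result_key; infer_instance

-- ===== CLAIM (what is proved, stated in full; the proofs are below) =====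
def Claim_equal_get_result_key : Prop := ∀ (result : List (List String)), Dom_get_result_key result → Spec_get_result_key result (get_result_key result)

-- ===== LEMMAS AND PROOFS =====

-- rendering equality: bRender = pyReprRowList
theorem bEsc_eq (q c : Char) (hq : q = '\'' ∨ q = '"') : bEsc q c = pyReprChar q c := by
  rcases hq with rfl | rfl <;>
  · by_cases h1 : c = '\\' <;> by_cases h2 : c = '\t' <;> by_cases h3 : c = '\n' <;>
      by_cases h4 : c = '\r' <;> by_cases h5 : c = '\'' <;> by_cases h6 : c = '"' <;>
      simp_all [bEsc, pyReprChar]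

theorem foldr_esc_eq (q : Char) (hq : q = '\'' ∨ q = '"') (cs : List Char) (tail : List Char) :
    cs.foldr (fun c acc => bEsc q c ++ acc) tail = cs.flatMap (pyReprChar q) ++ tail := by
  induction cs with
  | nil => simp
  | cons c cs ih => simp [ih, bEsc_eq q c hq]

theorem bStr_eq (s : String) : bStr s = pyReprStrChars s := by
  by_cases h1 : '\'' ∈ s.toList <;> by_cases h2 : '"' ∈ s.toList <;>
    simp [bStr, pyReprStrChars, h1, h2,
      foldr_esc_eq _ (Or.inl rfl), foldr_esc_eq _ (Or.inr rfl)]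

theorem join_eq (sep : List Char) (l : List (List Char)) :
    (l.intersperse sep).flatten = pyJoinSep sep l := by
  induction l with
  | nil => rfl
  | cons x xs ih =>
    cases xs with
    | nil => simp [pyJoinSep, List.intersperse]
    | cons y ys =>
      have h : (x :: y :: ys).intersperse sep = x :: sep :: (y :: ys).intersperse sep := rfl
      rw [h, List.flatten_cons, List.flatten_cons, ih]
      simp [pyJoinSep]

theorem bRow_eq (row : List String) : bRow row = pyReprRow row := by
  match row with
  | [] => rfl
  | [t] =>
    show '(' :: (bStr t ++ [',', ')']) = '(' :: (pyReprStrChars t ++ [',', ')'])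
    rw [bStr_eq]
  | a :: b :: rest =>
    show '(' :: ((((a :: b :: rest).map bStr).intersperse [',', ' ']).flatten ++ [')']) =
        '(' :: (pyJoinSep [',', ' '] ((a :: b :: rest).map pyReprStrChars) ++ [')'])
    rw [join_eq]
    simp only [show bStr = pyReprStrChars from funext bStr_eq]

theorem bRender_eq (rows : List (List String)) : bRender rows = pyReprRowList rows := by
  unfold bRender pyReprRowList
  rw [join_eq]
  simp only [show bRow = pyReprRow from funext bRow_eq]

-- bInsert keeps membership: result = {t} ∪ acc
theorem bInsert_mem (t : List String) (acc : List (List String)) (x : List String) :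
    x ∈ bInsert t acc ↔ x = t ∨ x ∈ acc := by
  induction acc with
  | nil => simp [bInsert]
  | cons u us ih =>
    simp only [bInsert]
    split
    · simp only [List.mem_cons, ih]; tauto
    · split
      · next h2 => subst h2; simp [List.mem_cons]
      · simp [List.mem_cons]

-- bInsert preserves strict sortedness
theorem bInsert_pairwise (t : List String) (acc : List (List String))
    (h : acc.Pairwise (· < ·)) : (bInsert t acc).Pairwise (· < ·) := by
  induction acc with
  | nil => simp [bInsert]
  | cons u us ih =>
    rcases List.pairwise_cons.mp h with ⟨hu, hus⟩
    by_cases h1 : u < t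
    · rw [bInsert, if_pos h1]
      refine List.pairwise_cons.mpr ⟨?_, ih hus⟩
      intro y hy
      rcases (bInsert_mem t us y).mp hy with rfl | hmem
      · exact h1
      · exact hu y hmem
    · by_cases h2 : u = t
      · rw [bInsert, if_neg h1, if_pos h2]; exact h
      · rw [bInsert, if_neg h1, if_neg h2]
        have htu : t < u := lt_of_le_of_ne (le_of_not_gt h1) (fun he => h2 he.symm)
        refine List.pairwise_cons.mpr ⟨?_, h⟩
        intro y hy
        rcases List.mem_cons.mp hy with rfl | hmem
        · exact htu
        · exact lt_trans htu (hu y hmem)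

-- the foldl of bInsert is strictly sorted and contains exactly acc ∪ xs
theorem foldl_bInsert_props (xs : List (List String)) (acc : List (List String))
    (h : acc.Pairwise (· < ·)) :
    (xs.foldl (fun a r => bInsert r a) acc).Pairwise (· < ·) ∧
    (∀ x, x ∈ xs.foldl (fun a r => bInsert r a) acc ↔ x ∈ acc ∨ x ∈ xs) := by
  induction xs generalizing acc with
  | nil => simp [h]
  | cons z zs ih =>
    have hz := bInsert_pairwise z acc h
    have hih := ih (bInsert z acc) hz
    refine ⟨hih.1, fun x => ?_⟩
    rw [List.foldl_cons, hih.2 x, bInsert_mem]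
    simp only [List.mem_cons]
    tauto

-- two strictly sorted lists with the same members are equal
theorem strict_sorted_ext (ys zs : List (List String))
    (hy : ys.Pairwise (· < ·)) (hz : zs.Pairwise (· < ·))
    (hmem : ∀ x, x ∈ ys ↔ x ∈ zs) : ys = zs := by
  have hperm : ys.Perm zs :=
    (List.perm_ext_iff_of_nodup (hy.imp ne_of_lt) (hz.imp ne_of_lt)).mpr hmem
  exact PySem.List.eq_of_perm_of_pairwise_le_of_injective (fun x => x)
    (fun _ _ h => h) hperm (hy.imp le_of_lt) (hz.imp le_of_lt)

-- align the sorted call's decidability instance with the LinearOrder one the library lemmas use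
theorem sorted_irrel (xs : List (List String)) :
    PySem.List.sorted xs (fun x : List String => x) false =
    @PySem.List.sorted (List String) (List String) List.instLinearOrder.toLT LinearOrder.toDecidableLT xs (fun x => x) false := by
  congr 1

-- core: A's sorted set equals B's insertion fold
theorem sorted_set_eq_insert_fold (xs : List (List String)) :
    PySem.List.sorted (PySem.Set.ofList xs) (fun x => x) false =
    xs.foldl (fun a r => bInsert r a) [] := by
  have hfold := foldl_bInsert_props xs [] (by simp)
  have h3 : ∀ x : List String,
      x ∈ PySem.List.sorted (PySem.Set.ofList xs) (fun x => x) false ↔ x ∈ xs := by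
    intro x
    rw [PySem.List.mem_sorted, PySem.Set.mem_ofList]
  rw [sorted_irrel]
  simp only [sorted_irrel] at h3
  refine strict_sorted_ext _ _ (PySem.List.sorted_ofList_pairwise_lt xs) hfold.1 ?_
  intro x
  rw [h3 x, hfold.2 x]
  simp

-- ===== VERDICT (by name: the statement is the Claim_ definition above) =====
theorem get_result_key_spec : Claim_equal_get_result_key := by
  intro result _
  unfold Spec_get_result_key get_result_key get_result_key_alt
  simp only [bRender_eq, sorted_set_eq_insert_fold, List.foldl_map]
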